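-- pv_equiv track=rewrite | github.com/Taksarayut/Equation-Stack | converter.py | replace_single_j
-- ===== SOURCE A (Python) =====
-- def is_float(string):
--    try:
--       float(string)
--       return True
--    except ValueError:
--       return False
--
-- def replace_single_j(text): # Check for single j's
--
--    def is_empty(list, index):
--       try:
--          list[index]
--       except IndexError:
--          return True
--
--    equation =[]
--    for letter in text:
--       equation.append(letter)
--
--    for index, element in enumerate(equation):
--       if element == "j": # Check j only
--             #j alone
--             if len(equation) == 1 and is_empty(equation, index+1):
--                equation[index] = "1j"
--             # j on the far left
--             elif index == 0:
--                equation[index] = "1j"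
--             # any j's with no float in front of them
--             elif is_float(equation[index-1]) == False:
--                equation[index] = "1j"
--             # any j's with openation in front of them (e.g -j, *j)
--             elif equation[index-1] in ["+" ,"-", "*", "/"]:
--                equation[index] = "1j"
--
--    result = "".join(equation)
--    return result
-- ===== SOURCE B (Python) =====
-- def replace_single_j(text):
--     # Split on the imaginary unit: each boundary between consecutive segments is one
--     # occurrence in the original text; re-insert it, prefixed unless the preceding
--     # segment ends in a decimal digit.
--     parts = text.split('j')
--     pieces = [parts[0]]
--     for prev, seg in zip(parts, parts[1:]):
--         pieces.append('j' if prev and prev[-1] in '0123456789' else '1j')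
--         pieces.append(seg)
--     return ''.join(pieces)
-- ===== Notes on version B (the rewrite author's own statement) =====
-- stated objective: simpler
-- what changed: Replaces A's build-a-char-list, enumerate-and-mutate-in-place loop with try/except float probes by a split-on-the-separator reconstruction: split the text on the target letter and rejoin the parts, inserting the letter with or without the '1' prefix at each boundary depending on whether the preceding part ends in a decimal digit.
import Mathlib
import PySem

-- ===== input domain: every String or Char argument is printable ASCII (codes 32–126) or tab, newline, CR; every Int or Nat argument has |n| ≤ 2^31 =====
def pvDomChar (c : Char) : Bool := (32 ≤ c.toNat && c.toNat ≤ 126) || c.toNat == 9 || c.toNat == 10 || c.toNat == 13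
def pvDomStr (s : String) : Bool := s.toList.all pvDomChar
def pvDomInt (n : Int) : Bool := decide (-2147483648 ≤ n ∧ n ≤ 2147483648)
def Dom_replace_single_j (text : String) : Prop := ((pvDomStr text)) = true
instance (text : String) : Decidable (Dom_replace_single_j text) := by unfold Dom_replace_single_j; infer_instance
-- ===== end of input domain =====

-- B replaces A's index loop with in-place mutation by a split-on-the-separator / interleave-and-rejoin reconstruction (objective: simpler).

-- ===== PORT A =====
-- is_float(s): float(s) succeeds. Exact for the arguments it receives here under
-- Dom_replace_single_j: single printable-ASCII characters (float succeeds exactly on the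
-- decimal digits) and the replacement string "1j" (float raises ValueError).
def pv_is_float (s : String) : Bool :=
  match s.toList with
  | [c] => decide (c ∈ ['0','1','2','3','4','5','6','7','8','9'])
  | _ => false

-- is_empty(list, index): True on IndexError, implicit None (falsy) otherwise.
def pv_is_empty (l : List String) (index : Nat) : Bool := l[index]?.isNone

-- the body of A's `for index, element in enumerate(equation)` loop (reads the live list)
def pv_loop_body (eq : List String) (index : Nat) : List String :=
  let element := eq.getD index ""   -- in-range read of the live list, as enumerate sees it
  if element == "j" then
    if eq.length == 1 && pv_is_empty eq (index + 1) then eq.set index "1j"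
    else if index == 0 then eq.set index "1j"
    else if pv_is_float (eq.getD (index - 1) "") == false then eq.set index "1j"
    else if ["+", "-", "*", "/"].contains (eq.getD (index - 1) "") then eq.set index "1j"
    else eq
  else eq

def replace_single_j (text : String) : String :=
  let equation := text.toList.map (fun letter => String.ofList [letter])
  let equation := (List.range equation.length).foldl pv_loop_body equation
  PySem.Str.join "" equation

-- ===== PORT B =====
-- prev and prev[-1] in '0123456789'
def pv_digit_last (prev : String) : Bool :=
  prev != "" && (match PySem.Str.pyGet? prev (-1) with
                 | some ch => PySem.Chars.isIn [ch] "0123456789".toList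
                 | none => false)

def replace_single_j_alt (text : String) : String :=
  let parts := (PySem.Str.split? text "j").getD []   -- separator "j" ≠ "": split? is always some
  match parts with
  | [] => ""   -- unreachable: split always yields at least one part
  | p0 :: rest =>
    let pieces := (parts.zip rest).foldl (fun acc pr =>
      acc ++ [if pv_digit_last pr.1 then "j" else "1j", pr.2]) [p0]
    PySem.Str.join "" pieces

-- ===== PRECONDITION & SPEC =====
def Spec_replace_single_j (text : String) (out : String) : Prop := out = replace_single_j_alt text
instance (text : String) (out : String) : Decidable (Spec_replace_single_j text out) := by unfold Spec_replace_single_j; infer_instance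

-- ===== CLAIM (what is proved, stated in full; the proofs are below) =====
def Claim_equal_replace_single_j : Prop := ∀ (text : String), Dom_replace_single_j text → Spec_replace_single_j text (replace_single_j text)

-- ===== LEMMAS AND PROOFS =====

def pvDig (c : Char) : Bool := decide (c ∈ ['0','1','2','3','4','5','6','7','8','9'])

-- the common target: per character, 'j' becomes "1j" unless the previous character is a digit
def pvT : Bool → List Char → List Char
  | _, [] => []
  | d, c :: cs => (if c = 'j' ∧ d = false then ['1','j'] else [c]) ++ pvT (pvDig c) cs

def pvSing (c : Char) : String := String.ofList [c]

-- A-side intermediate: the final state of A's list of one-character strings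
def pvTransS : Bool → List Char → List String
  | _, [] => []
  | d, c :: cs => (if c = 'j' ∧ d = false then "1j" else pvSing c) :: pvTransS (pvDig c) cs

-- split-side reference: text.split('j') as a structural recursion
def pvSplitJ : List Char → List (List Char)
  | [] => [[]]
  | c :: cs => if c = 'j' then [] :: pvSplitJ cs else
      match pvSplitJ cs with
      | [] => [[c]]
      | h :: t => (c :: h) :: t

def pvDlast (d : Bool) (b : List Char) : Bool := b.foldl (fun _ c => pvDig c) d

-- B-side reference: head part ++ (marker ++ part) for every later part
def pvF : Bool → List (List Char) → List Char
  | _, [] => []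
  | d, b :: bs => (if d then ['j'] else ['1','j']) ++ b ++ pvF (pvDlast false b) bs

lemma pvSplitJ_ne_nil (cs : List Char) : pvSplitJ cs ≠ [] := by
  induction cs with
  | nil => simp [pvSplitJ]
  | cons c cs ih =>
    simp only [pvSplitJ]
    split
    · simp
    · cases h : pvSplitJ cs <;> simp

lemma pv_go_eq : ∀ (fuel : Nat) (l cur : List Char) (acc : List (List Char)), l.length < fuel →
    PySem.Chars.splitOn.go ['j'] fuel l cur acc =
      acc.reverse ++ (match pvSplitJ l with | [] => [] | h :: t => (cur.reverse ++ h) :: t) := by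
  intro fuel
  induction fuel with
  | zero => intro l cur acc h; omega
  | succ n ih =>
    intro l cur acc h
    cases l with
    | nil => simp [PySem.Chars.splitOn.go, pvSplitJ]
    | cons c rest =>
      rw [PySem.Chars.splitOn.go]
      by_cases hc : c = 'j'
      · subst hc
        rw [if_pos (by simp [List.isPrefixOf])]
        simp only [List.length_cons, List.drop_succ_cons, List.length_nil, List.drop_zero]
        rw [ih rest [] _ (by simpa using Nat.lt_of_succ_lt_succ (by simpa using h))]
        cases hs : pvSplitJ rest with
        | nil => exact absurd hs (pvSplitJ_ne_nil rest)
        | cons h' t' => simp [pvSplitJ, hs]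
      · rw [if_neg (by simp [List.isPrefixOf]; exact fun x => hc x.symm)]
        rw [ih rest (c :: cur) acc (by simpa using Nat.lt_of_succ_lt_succ (by simpa using h))]
        cases hs : pvSplitJ rest with
        | nil => exact absurd hs (pvSplitJ_ne_nil rest)
        | cons h' t' => simp [pvSplitJ, hs, hc]

lemma pv_splitOn_eq (cs : List Char) : PySem.Chars.splitOn cs ['j'] = pvSplitJ cs := by
  rw [PySem.Chars.splitOn, pv_go_eq (cs.length + 1) cs [] [] (by omega)]
  cases hs : pvSplitJ cs with
  | nil => exact absurd hs (pvSplitJ_ne_nil cs)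
  | cons h t => simp

-- joining with the empty separator is concatenation
lemma pv_join_nil_eq_flatten (xs : List (List Char)) :
    PySem.Chars.join [] xs = xs.flatten := by
  induction xs with
  | nil => simp [PySem.Chars.join_nil]
  | cons p rest ih =>
    cases rest with
    | nil => simp [PySem.Chars.join_singleton]
    | cons q rs => rw [PySem.Chars.join_cons_cons]; simp_all

-- the key split lemma: pvT through pvSplitJ
lemma pv_key : ∀ (cs : List Char) (d : Bool) (h : List Char) (t : List (List Char)),
    pvSplitJ cs = h :: t → pvT d cs = h ++ pvF (pvDlast d h) t := by
  intro cs
  induction cs with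
  | nil =>
    intro d h t hs
    simp only [pvSplitJ, List.cons.injEq] at hs
    obtain ⟨h1, h2⟩ := hs
    subst h1; subst h2
    simp [pvT, pvF]
  | cons c cs ih =>
    intro d h t hs
    by_cases hc : c = 'j'
    · subst hc
      rw [show pvSplitJ ('j' :: cs) = [] :: pvSplitJ cs from by simp [pvSplitJ]] at hs
      injection hs with hh ht
      subst hh
      cases hs' : pvSplitJ cs with
      | nil => exact absurd hs' (pvSplitJ_ne_nil cs)
      | cons h' t' =>
        rw [hs'] at ht; subst ht
        simp only [pvT, pvDlast, List.foldl_nil, pvF]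
        rw [ih (pvDig 'j') h' t' hs']
        simp only [pvDig, pvDlast]
        cases d <;> simp
    · simp only [pvSplitJ, if_neg hc] at hs
      cases hs' : pvSplitJ cs with
      | nil => exact absurd hs' (pvSplitJ_ne_nil cs)
      | cons h' t' =>
        rw [hs'] at hs
        simp only [List.cons.injEq] at hs
        obtain ⟨hh, ht⟩ := hs
        subst ht
        rw [← hh]
        have hif : ¬(c = 'j' ∧ d = false) := fun hx => hc hx.1
        simp only [pvT, if_neg hif, List.singleton_append]
        rw [ih (pvDig c) h' t' hs']
        simp [pvDlast]

lemma pv_isIn_single (ch : Char) (ds : List Char) :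
    PySem.Chars.isIn [ch] ds = decide (ch ∈ ds) := by
  have h := PySem.Chars.isIn_iff_infix [ch] ds
  rw [List.singleton_infix_iff] at h
  cases hx : PySem.Chars.isIn [ch] ds
  · rw [hx] at h; simp at h; simp [h]
  · rw [hx] at h; simp at h; simp [h]

lemma pvDlast_eq_getLast : ∀ (b : List Char) (d : Bool),
    pvDlast d b = (match b.getLast? with | some c => pvDig c | none => d) := by
  intro b
  induction b with
  | nil => intro d; simp [pvDlast]
  | cons c bs ih =>
    intro d
    have : pvDlast d (c :: bs) = pvDlast (pvDig c) bs := rfl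
    rw [this, ih (pvDig c)]
    cases hb : bs.getLast? with
    | some c' => simp [List.getLast?_cons, hb]
    | none =>
      have : bs = [] := by cases bs <;> simp_all
      subst this; simp

lemma pv_digit_last_ofList (b : List Char) :
    pv_digit_last (String.ofList b) = pvDlast false b := by
  unfold pv_digit_last
  cases b with
  | nil => simp [pvDlast]
  | cons c bs =>
    have hne : (String.ofList (c :: bs) != "") = true := by
      simp [String.ext_iff]
    rw [hne, Bool.true_and]
    have hget : PySem.Str.pyGet? (String.ofList (c :: bs)) (-1) = (c :: bs).getLast? := by
      simp [PySem.Str.pyGet?, PySem.List.pyGet?_neg_one]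
    rw [hget]
    cases hl : (c :: bs).getLast? with
    | none => simp at hl
    | some c' =>
      rw [pvDlast_eq_getLast, hl]
      show PySem.Chars.isIn [c'] "0123456789".toList = pvDig c'
      rw [pv_isIn_single]
      rfl

lemma pv_B_fold : ∀ (t : List (List Char)) (h : List Char),
    (List.flatMap (fun pr => [if pv_digit_last pr.1 then "j" else "1j", pr.2])
        ((String.ofList h :: t.map String.ofList).zip (t.map String.ofList))).flatMap String.toList
      = pvF (pvDlast false h) t := by
  intro t
  induction t with
  | nil => intro h; simp [pvF]
  | cons b bs ih =>
    intro h
    simp only [List.map_cons, List.zip_cons_cons, List.flatMap_cons, List.flatMap_append]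
    rw [ih b]
    simp only [List.flatMap_nil, pvF, pv_digit_last_ofList]
    cases hd : pvDlast false h <;> simp

lemma pv_is_float_sing (c : Char) : pv_is_float (pvSing c) = pvDig c := by
  simp [pv_is_float, pvSing, pvDig]

lemma pv_float_not_op (s : String) (h : pv_is_float s = true) :
    (["+", "-", "*", "/"].contains s) = false := by
  unfold pv_is_float at h
  cases hs : s.toList with
  | nil => rw [hs] at h; simp at h
  | cons c tl =>
    cases tl with
    | cons _ _ => rw [hs] at h; simp at h
    | nil =>
      rw [hs] at h
      simp only [decide_eq_true_eq] at h
      have hse : s = String.ofList [c] := by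
        rw [← hs]; exact String.ofList_toList.symm
      subst hse
      fin_cases h <;> decide

lemma pv_getD_append (l r : List String) (x : String) :
    (l ++ x :: r).getD l.length "" = x := by
  simp [List.getD]

lemma pv_set_append (l r : List String) (x v : String) :
    (l ++ x :: r).set l.length v = l ++ v :: r := by
  rw [List.set_append_right _ _ (le_refl _)]
  simp

lemma pv_getD_pred (l r : List String) (s : String) (h : l.getLast? = some s) :
    (l ++ r).getD (l.length - 1) "" = s := by
  have hne : l ≠ [] := by rintro rfl; simp at h
  have hlen : 0 < l.length := List.length_pos_iff.mpr hne
  rw [List.getLast?_eq_getElem?] at h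
  simp [List.getD, List.getElem?_append_left (by omega : l.length - 1 < l.length), h]

lemma pv_sing_beq_j (c : Char) : (pvSing c == "j") = (c == 'j') := by
  simp [pvSing, String.ext_iff]

lemma pv_transS_toList : ∀ (d : Bool) (cs : List Char),
    (pvTransS d cs).flatMap String.toList = pvT d cs := by
  intro d cs
  induction cs generalizing d with
  | nil => simp [pvTransS, pvT]
  | cons c cs ih =>
    simp only [pvTransS, pvT, List.flatMap_cons]
    rw [ih (pvDig c)]
    by_cases hc : c = 'j' ∧ d = false
    · simp [hc]
    · simp only [if_neg hc]
      simp [pvSing]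

lemma pv_body_eq (done : List String) (rest : List Char) (c : Char) (d : Bool)
    (h0 : done = [] → d = false)
    (hlast : ∀ s, done.getLast? = some s → pv_is_float s = d) :
    pv_loop_body (done ++ (c :: rest).map pvSing) done.length
      = done ++ (if c = 'j' ∧ d = false then "1j" else pvSing c) :: rest.map pvSing := by
  unfold pv_loop_body
  simp only [List.map_cons]
  rw [pv_getD_append]
  by_cases hc : c = 'j'
  · subst hc
    rw [show (pvSing 'j' == "j") = true from by decide, if_pos rfl]
    by_cases hd0 : done = []
    · subst hd0
      have hdf : d = false := h0 rfl
      subst hdf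
      simp only [List.nil_append, List.length_nil]
      rw [if_pos (And.intro trivial trivial)]
      by_cases hr : rest = []
      · subst hr
        simp [pv_is_empty]
      · simp [pv_is_empty, hr]
    · have hlp : 0 < done.length := List.length_pos_iff.mpr hd0
      obtain ⟨s, hs⟩ := Option.isSome_iff_exists.mp (List.getLast?_isSome.mpr hd0)
      have hfl := hlast s hs
      have hlen1 : ((done ++ pvSing 'j' :: rest.map pvSing).length == 1) = false := by
        simp only [List.length_append, List.length_cons, beq_eq_false_iff_ne, ne_eq]
        omega
      rw [hlen1, Bool.false_and, if_neg (by simp)]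
      have hk0 : (done.length == 0) = false := by
        simp only [beq_eq_false_iff_ne, ne_eq]
        omega
      simp only [hk0, Bool.false_eq_true, if_false]
      rw [pv_getD_pred done _ s hs, hfl]
      cases d with
      | false =>
        rw [if_pos (by decide), pv_set_append]
        rw [if_pos (And.intro trivial rfl)]
      | true =>
        rw [if_neg (by decide)]
        simp only [pv_float_not_op s hfl, Bool.false_eq_true, if_false]
        rw [if_neg (by simp)]
  · rw [pv_sing_beq_j, if_neg (by simpa using hc)]
    rw [if_neg (by simp [hc])]

lemma pv_loop : ∀ (rest : List Char) (done : List String) (d : Bool),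
    (done = [] → d = false) →
    (∀ s, done.getLast? = some s → pv_is_float s = d) →
    (List.range' done.length rest.length 1).foldl pv_loop_body (done ++ rest.map pvSing)
      = done ++ pvTransS d rest := by
  intro rest
  induction rest with
  | nil => intro done d _ _; simp [pvTransS]
  | cons c rest ih =>
    intro done d h0 hlast
    rw [List.length_cons, List.range'_succ, List.foldl_cons]
    rw [pv_body_eq done rest c d h0 hlast]
    set head := if c = 'j' ∧ d = false then "1j" else pvSing c with hhead
    have hassoc : done ++ head :: rest.map pvSing = (done ++ [head]) ++ rest.map pvSing := by simp
    have hlen : done.length + 1 = (done ++ [head]).length := by simp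
    rw [hassoc, hlen]
    rw [ih (done ++ [head]) (pvDig c) (by simp) ?_]
    · simp only [pvTransS, ← hhead]
      simp
    · intro s hs
      rw [List.getLast?_concat] at hs
      cases hs
      rw [hhead]
      by_cases hcd : c = 'j' ∧ d = false
      · rw [if_pos hcd, hcd.1]
        decide
      · rw [if_neg hcd, pv_is_float_sing]

theorem pvA_chars (text : String) : (replace_single_j text).toList = pvT false text.toList := by
  show (PySem.Str.join "" (List.foldl pv_loop_body (text.toList.map pvSing)
      (List.range (text.toList.map pvSing).length))).toList = pvT false text.toList
  have hfold : List.foldl pv_loop_body (text.toList.map pvSing)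
      (List.range (text.toList.map pvSing).length) = pvTransS false text.toList := by
    have h := pv_loop text.toList [] false (fun _ => rfl) (by intro s hs; simp at hs)
    simpa [List.range_eq_range'] using h
  rw [hfold]
  show (String.ofList (PySem.Chars.join "".toList ((pvTransS false text.toList).map String.toList))).toList
      = pvT false text.toList
  rw [String.toList_ofList, show ("".toList) = ([] : List Char) from rfl,
    pv_join_nil_eq_flatten, ← List.flatMap_def]
  exact pv_transS_toList false text.toList

theorem pvB_chars (text : String) : (replace_single_j_alt text).toList = pvT false text.toList := by
  unfold replace_single_j_alt
  have hsplit : PySem.Str.split? text "j" = some ((pvSplitJ text.toList).map String.ofList) := by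
    simp [PySem.Str.split?, PySem.Chars.split?, pv_splitOn_eq]
  rw [hsplit]
  cases hp : pvSplitJ text.toList with
  | nil => exact absurd hp (pvSplitJ_ne_nil _)
  | cons h t =>
    simp only [Option.getD_some, List.map_cons]
    rw [PySem.List.foldl_append_eq_flatMap
      (fun pr : String × String => [if pv_digit_last pr.1 = true then "j" else "1j", pr.2])]
    simp only [PySem.Str.join, String.toList_ofList]
    rw [show ("".toList) = ([] : List Char) from rfl, pv_join_nil_eq_flatten, ← List.flatMap_def]
    rw [List.flatMap_append]
    simp only [List.flatMap_cons, List.flatMap_nil, String.toList_ofList, List.append_nil]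
    rw [pv_B_fold t h]
    exact (pv_key text.toList false h t hp).symm

-- ===== VERDICT (by name: the statement is the Claim_ definition above) =====
theorem replace_single_j_spec : Claim_equal_replace_single_j := by
  intro text _
  unfold Spec_replace_single_j
  exact String.ext_iff.mpr ((pvA_chars text).trans (pvB_chars text).symm)
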